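-- pv_equiv track=rewrite | github.com/leo-editor/new-leo-model | leoDataModel.py | str_to_fa
-- ===== SOURCE A (Python) =====
-- from collections import defaultdict, namedtuple
--
-- FindArgs = namedtuple('FindArgs', 't_find t_replace flags')
--
-- def str_to_fa(s):
--     t_find = ''
--     t_replace = ''
--     kw = {}
--     for line in s.splitlines():
--         if ':' not in line:continue
--         x,y = line.split(':')
--         if x == 't_find':
--             t_find = y
--         elif x == 't_replace':
--             t_replace = y
--         elif x not in FA_FLAGS:
--             continue
--         elif y in ('True', 'yes', 'on', '1', 'true'):
--             y = True
--         else: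
--             y = False
--         kw[x] = y
--     return FindArgs(t_find, t_replace, fa_flags(**kw))
--
-- FA_FLAGS = dict((x, (1<<i)) for i,x in enumerate((
--     'ignore_case', 'node_only', 'pattern_match',
--     'search_headline', 'search_body', 'suboutline_only',
--     'mark_changes', 'mark_finds', 'reverse', 'wrap',
--     'whole_word')))
--
-- def fa_flags(**kw):
--     res = kw.get('flags', 24)
--     for k, v in kw.items():
--         if k in FA_FLAGS:
--             f = FA_FLAGS[k]
--             res = res | f if v else res & ~f
--     return res
-- ===== SOURCE B (Python) =====
-- from collections import namedtuple
--
-- FindArgs = namedtuple('FindArgs', 't_find t_replace flags')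
--
-- FA_FLAGS = dict((x, (1 << i)) for i, x in enumerate((
--     'ignore_case', 'node_only', 'pattern_match',
--     'search_headline', 'search_body', 'suboutline_only',
--     'mark_changes', 'mark_finds', 'reverse', 'wrap',
--     'whole_word')))
--
-- def str_to_fa(s):
--     t_find = ''
--     t_replace = ''
--     flags = 24
--     for line in s.splitlines():
--         if ':' not in line:
--             continue
--         x, y = line.split(':')
--         if x == 't_find':
--             t_find = y
--         elif x == 't_replace':
--             t_replace = y
--         elif x in FA_FLAGS:
--             if y in ('True', 'yes', 'on', '1', 'true'):
--                 flags |= FA_FLAGS[x]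
--             else:
--                 flags &= ~FA_FLAGS[x]
--     return FindArgs(t_find, t_replace, flags)
-- ===== Notes on version B (the rewrite author's own statement) =====
-- stated objective: simpler
-- what changed: B drops A's intermediate kw dict and the separate fa_flags fold over it, accumulating the integer flags directly in one pass over the lines (correct because distinct flag keys touch distinct bits and a repeated key's last update wins either way).
import Mathlib
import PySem

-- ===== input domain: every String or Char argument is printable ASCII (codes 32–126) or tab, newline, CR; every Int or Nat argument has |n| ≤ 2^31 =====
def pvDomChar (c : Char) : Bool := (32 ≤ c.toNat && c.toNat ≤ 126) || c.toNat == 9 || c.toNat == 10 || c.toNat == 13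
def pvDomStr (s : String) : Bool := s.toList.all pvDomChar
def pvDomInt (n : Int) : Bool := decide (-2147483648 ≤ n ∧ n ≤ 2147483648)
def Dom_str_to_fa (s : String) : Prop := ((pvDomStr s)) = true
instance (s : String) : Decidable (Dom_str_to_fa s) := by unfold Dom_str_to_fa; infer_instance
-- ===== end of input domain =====

-- B drops A's kw dict and the separate fa_flags fold, accumulating the flags integer directly
-- in one pass over the lines (objective: simpler).

-- ===== PORT A =====
-- FA_FLAGS = dict((x, (1<<i)) for i, x in enumerate((...)))
def FA_FLAGS : PySem.Dict String Int :=
  PySem.Dict.ofList ((PySem.List.enumerate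
    ["ignore_case", "node_only", "pattern_match",
     "search_headline", "search_body", "suboutline_only",
     "mark_changes", "mark_finds", "reverse", "wrap",
     "whole_word"]).map (fun p => (p.2, ((1 <<< p.1.toNat : Nat) : Int))))
     -- (enumerate indices are ≥ 0, so .toNat is exact for the shift amount)

def truthy : List String := ["True", "yes", "on", "1", "true"]

-- Python truthiness of the values stored in kw (str or bool)
def pyTruth : String ⊕ Bool → Bool
  | .inl y => !(y == "")
  | .inr b => b

-- res = res | f if v else res & ~f   (Python ~f on int is exactly -f-1)
def istep (f : Int) (b : Bool) (res : Int) : Int :=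
  if b then PySem.Int.bor res f else PySem.Int.band res (-f - 1)

-- one iteration of the loop in fa_flags: 'if k in FA_FLAGS: f = FA_FLAGS[k]; res = ...'
def faStep (res : Int) (kv : String × (String ⊕ Bool)) : Int :=
  match FA_FLAGS.get? kv.1 with
  | some f => istep f (pyTruth kv.2) res
  | none => res

-- fa_flags(**kw); res = kw.get('flags', 24): str_to_fa never stores a 'flags' key
-- (such lines hit the 'x not in FA_FLAGS' continue), so the default 24 is exact here
def fa_flags (kw : PySem.Dict String (String ⊕ Bool)) : Int :=
  kw.items.foldl faStep 24

-- the body of A's 'for line in s.splitlines()' loop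
def lineStepA (st : String × String × PySem.Dict String (String ⊕ Bool)) (line : String) :
    String × String × PySem.Dict String (String ⊕ Bool) :=
  if PySem.Str.isIn ":" line = true then
    match PySem.Str.split? line ":" with
    | some [x, y] =>
      if x = "t_find" then (y, st.2.1, st.2.2.insert x (.inl y))
      else if x = "t_replace" then (st.1, y, st.2.2.insert x (.inl y))
      else if FA_FLAGS.contains x = false then st
      else if y ∈ truthy then (st.1, st.2.1, st.2.2.insert x (.inr true))
      else (st.1, st.2.1, st.2.2.insert x (.inr false))
    | _ => st  -- the two-target unpack of line.split raises ValueError here; excluded by Pre_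
  else st

def str_to_fa (s : String) : String × String × Int :=
  let st := (PySem.Str.splitlines s).foldl lineStepA ("", "", PySem.Dict.empty)
  (st.1, st.2.1, fa_flags st.2.2)

-- ===== PORT B =====
-- the body of B's single loop: flags is accumulated directly, no dict
def lineStepB (st : String × String × Int) (line : String) : String × String × Int :=
  if PySem.Str.isIn ":" line = true then
    match PySem.Str.split? line ":" with
    | some [x, y] =>
      if x = "t_find" then (y, st.2.1, st.2.2)
      else if x = "t_replace" then (st.1, y, st.2.2)
      else match FA_FLAGS.get? x with       -- elif x in FA_FLAGS:
        | some f => (st.1, st.2.1, istep f (decide (y ∈ truthy)) st.2.2)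
        | none => st
    | _ => st  -- ValueError; excluded by Pre_
  else st

def str_to_fa_alt (s : String) : String × String × Int :=
  (PySem.Str.splitlines s).foldl lineStepB ("", "", 24)

-- ===== PRECONDITION & SPEC =====
-- Pre_ excludes exactly the inputs on which A raises ValueError: a line containing two or
-- more colon characters makes the two-target unpack of line.split fail (both Pythons raise there).
def Pre_str_to_fa (s : String) : Prop :=
  ∀ line ∈ PySem.Str.splitlines s, PySem.Str.count line ":" ≤ 1
instance (s : String) : Decidable (Pre_str_to_fa s) := by unfold Pre_str_to_fa; infer_instance
def pvWitness_str_to_fa : String := "t_find:abc\nwrap:1\nsearch_body:no"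

def Spec_str_to_fa (s : String) (out : String × String × Int) : Prop := out = str_to_fa_alt s
instance (s : String) (out : String × String × Int) : Decidable (Spec_str_to_fa s out) := by unfold Spec_str_to_fa; infer_instance

-- ===== CLAIM (what is proved, stated in full; the proofs are below) =====
def Claim_equal_str_to_fa : Prop := ∀ (s : String), Dom_str_to_fa s → Pre_str_to_fa s → Spec_str_to_fa s (str_to_fa s)

-- ===== LEMMAS AND PROOFS =====

-- the items of FA_FLAGS, as a literal
def faLit : List (String × Int) :=
  [("ignore_case", 1), ("node_only", 2), ("pattern_match", 4),
   ("search_headline", 8), ("search_body", 16), ("suboutline_only", 32),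
   ("mark_changes", 64), ("mark_finds", 128), ("reverse", 256), ("wrap", 512),
   ("whole_word", 1024)]

theorem pv_FA_items : FA_FLAGS.items = faLit := by decide

theorem pv_FA_mem {k : String} {f : Int} (h : FA_FLAGS.get? k = some f) : (k, f) ∈ faLit := by
  rw [← pv_FA_items]
  exact PySem.Dict.mem_items_of_get?_eq_some FA_FLAGS h

theorem pv_FA_mask : ∀ p ∈ faLit, ∃ i, i < 11 ∧ p.2 = ((2 ^ i : Nat) : Int) := by decide

theorem pv_FA_inj : ∀ p ∈ faLit, ∀ q ∈ faLit, p.1 ≠ q.1 → p.2 ≠ q.2 := by decide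

-- x - (x &&& m) is the bitwise set difference x.ldiff m
theorem pv_land_add_ldiff (x m : Nat) : (x &&& m) + Nat.ldiff x m = x := by
  induction x using Nat.binaryRec generalizing m with
  | zero => simp [Nat.zero_and, Nat.ldiff, Nat.bitwise_zero_left]
  | bit b x IH =>
    cases m using Nat.bitCasesOn with
    | bit b' m =>
      rw [Nat.land_bit, Nat.ldiff_bit, Nat.bit_val, Nat.bit_val, Nat.bit_val]
      have := IH m
      cases b <;> cases b' <;> simp <;> omega

theorem pv_sub_land (x m : Nat) : x - (x &&& m) = Nat.ldiff x m := by
  have := pv_land_add_ldiff x m; omega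

theorem pv_band_neg (n m : Nat) :
    PySem.Int.band (n : Int) (-(m : Int) - 1) = ((Nat.ldiff n m : Nat) : Int) := by
  have h1 : ¬ (0 ≤ -(m : Int) - 1) := by omega
  simp only [PySem.Int.band, Int.natCast_nonneg, if_true, h1, if_false]
  have h2 : (-(-(m : Int) - 1) - 1) = (m : Int) := by ring
  rw [h2]
  simp [pv_sub_land n m]

-- istep on Nat values
def natStep (m : Nat) (b : Bool) (n : Nat) : Nat := if b then n ||| m else Nat.ldiff n m

theorem pv_istep_cast (m : Nat) (b : Bool) (n : Nat) :
    istep ((m : Nat) : Int) b ((n : Nat) : Int) = ((natStep m b n : Nat) : Int) := by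
  cases b <;> simp [istep, natStep, PySem.Int.bor_natCast, pv_band_neg]

theorem pv_natStep_testBit (m : Nat) (b : Bool) (n k : Nat) :
    (natStep m b n).testBit k = if m.testBit k = true then b else n.testBit k := by
  cases b <;> simp [natStep, Nat.testBit_lor, Nat.testBit_ldiff] <;>
    by_cases h : m.testBit k <;> simp [h]

theorem pv_natStep_comm {i j : Nat} (hij : i ≠ j) (b1 b2 : Bool) (n : Nat) :
    natStep (2 ^ i) b1 (natStep (2 ^ j) b2 n) = natStep (2 ^ j) b2 (natStep (2 ^ i) b1 n) := by
  apply Nat.eq_of_testBit_eq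
  intro k
  simp only [pv_natStep_testBit, Nat.testBit_two_pow]
  by_cases h1 : i = k <;> by_cases h2 : j = k <;> simp [h1, h2] <;> omega

theorem pv_natStep_over (m : Nat) (b b' : Bool) (n : Nat) :
    natStep m b (natStep m b' n) = natStep m b n := by
  apply Nat.eq_of_testBit_eq
  intro k
  simp only [pv_natStep_testBit]
  by_cases h : m.testBit k <;> simp [h]

theorem pv_faStep_nonneg {r : Int} (hr : 0 ≤ r) (p : String × (String ⊕ Bool)) :
    0 ≤ faStep r p := by
  cases hg : FA_FLAGS.get? p.1 with
  | none => simp only [faStep, hg]; exact hr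
  | some f =>
    obtain ⟨i, _, hf⟩ := pv_FA_mask _ (pv_FA_mem hg)
    have hf2 : f = ((2 ^ i : Nat) : Int) := hf
    obtain ⟨n, rfl⟩ := Int.eq_ofNat_of_zero_le hr
    simp only [faStep, hg]
    rw [hf2, pv_istep_cast]
    exact Int.natCast_nonneg _

theorem pv_fold_nonneg {r : Int} (hr : 0 ≤ r) (l : List (String × (String ⊕ Bool))) :
    0 ≤ l.foldl faStep r := by
  induction l generalizing r with
  | nil => exact hr
  | cons p l IH => exact IH (pv_faStep_nonneg hr p)

theorem pv_comm {r : Int} (hr : 0 ≤ r) {x : String} {f : Int}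
    (hx : FA_FLAGS.get? x = some f) (b : Bool) (p : String × (String ⊕ Bool)) (hp : p.1 ≠ x) :
    faStep (istep f b r) p = istep f b (faStep r p) := by
  cases hg : FA_FLAGS.get? p.1 with
  | none => simp only [faStep, hg]
  | some f' =>
    obtain ⟨i, _, hf⟩ := pv_FA_mask _ (pv_FA_mem hx)
    obtain ⟨j, _, hf'⟩ := pv_FA_mask _ (pv_FA_mem hg)
    have hf2 : f = ((2 ^ i : Nat) : Int) := hf
    have hf'2 : f' = ((2 ^ j : Nat) : Int) := hf'
    have hne : f ≠ f' := pv_FA_inj _ (pv_FA_mem hx) _ (pv_FA_mem hg) (fun h => hp (h.symm))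
    have hij : i ≠ j := by
      intro h
      exact hne (by rw [hf2, hf'2, h])
    obtain ⟨n, rfl⟩ := Int.eq_ofNat_of_zero_le hr
    simp only [faStep, hg]
    rw [hf2, hf'2]
    simp only [pv_istep_cast]
    exact congrArg (fun t : Nat => (t : Int)) (pv_natStep_comm hij.symm (pyTruth p.2) b n)

theorem pv_over {r : Int} (hr : 0 ≤ r) {f : Int} {k : String}
    (hx : FA_FLAGS.get? k = some f) (b b' : Bool) :
    istep f b (istep f b' r) = istep f b r := by
  obtain ⟨i, _, hf⟩ := pv_FA_mask _ (pv_FA_mem hx)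
  have hf2 : f = ((2 ^ i : Nat) : Int) := hf
  obtain ⟨n, rfl⟩ := Int.eq_ofNat_of_zero_le hr
  rw [hf2]
  simp only [pv_istep_cast]
  exact congrArg (fun t : Nat => (t : Int)) (pv_natStep_over (2 ^ i) b b' n)

theorem pv_swap_fold {x : String} {f : Int} (hx : FA_FLAGS.get? x = some f) (b : Bool)
    (l : List (String × (String ⊕ Bool))) :
    ∀ {r : Int}, 0 ≤ r → (∀ p ∈ l, p.1 ≠ x) →
    l.foldl faStep (istep f b r) = istep f b (l.foldl faStep r) := by
  induction l with
  | nil => intro r _ _; rfl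
  | cons p l IH =>
    intro r hr hl
    simp only [List.foldl_cons]
    rw [pv_comm hr hx b p (hl p (List.mem_cons_self))]
    exact IH (pv_faStep_nonneg hr p) (fun q hq => hl q (List.mem_cons_of_mem p hq))

theorem pv_fa_insert (kw : PySem.Dict String (String ⊕ Bool)) (h : kw.keys.Nodup)
    (x : String) (v : String ⊕ Bool) :
    fa_flags (kw.insert x v) = faStep (fa_flags kw) (x, v) := by
  unfold fa_flags
  by_cases hc : kw.contains x = true
  · -- x already a key: the item is overwritten in place
    have hsome : (kw.get? x).isSome := by rw [← PySem.Dict.contains_eq_isSome_get?, hc]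
    obtain ⟨old, hold⟩ := Option.isSome_iff_exists.mp hsome
    have hmem := PySem.Dict.mem_items_of_get?_eq_some kw hold
    obtain ⟨l1, l2, hitems⟩ := List.append_of_mem hmem
    have hkeys : ((l1 ++ (x, old) :: l2).map Prod.fst).Nodup := by
      have h' := h
      simp only [PySem.Dict.keys, hitems] at h'
      exact h'
    rw [List.map_append, List.map_cons, List.nodup_append] at hkeys
    have hl1x : ∀ p ∈ l1, p.1 ≠ x := by
      intro p hp hpx
      have hm : x ∈ l1.map Prod.fst := by rw [← hpx]; exact List.mem_map_of_mem hp
      exact hkeys.2.2 x hm x List.mem_cons_self rfl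
    have hl2x : ∀ p ∈ l2, p.1 ≠ x := by
      intro p hp hpx
      have hm : x ∈ l2.map Prod.fst := by rw [← hpx]; exact List.mem_map_of_mem hp
      exact (List.nodup_cons.mp hkeys.2.1).1 hm
    rw [PySem.Dict.items_insert_of_contains kw v hc, hitems]
    have hmapl1 : (l1.map (fun p => if (p.1 == x) = true then (x, v) else p)) = l1 := by
      conv_rhs => rw [← List.map_id l1]
      exact List.map_congr_left (fun p hp => by simp [hl1x p hp])
    have hmapl2 : (l2.map (fun p => if (p.1 == x) = true then (x, v) else p)) = l2 := by
      conv_rhs => rw [← List.map_id l2]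
      exact List.map_congr_left (fun p hp => by simp [hl2x p hp])
    simp only [List.map_append, List.map_cons, hmapl1, hmapl2, beq_self_eq_true, if_true,
      List.foldl_append, List.foldl_cons]
    have hr0 : (0 : Int) ≤ l1.foldl faStep 24 := pv_fold_nonneg (by norm_num) l1
    cases hg : FA_FLAGS.get? x with
    | none =>
      have hid : ∀ (r : Int) (w : String ⊕ Bool), faStep r (x, w) = r := by
        intro r w; unfold faStep; rw [hg]
      rw [hid, hid, hid]
    | some f =>
      have hst : ∀ (r : Int) (w : String ⊕ Bool), faStep r (x, w) = istep f (pyTruth w) r := by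
        intro r w; unfold faStep; rw [hg]
      rw [hst, hst, hst, pv_swap_fold hg _ l2 hr0 hl2x,
        pv_swap_fold hg _ l2 hr0 hl2x, pv_over (pv_fold_nonneg hr0 l2) hg]
  · rw [PySem.Dict.items_insert_of_not_contains kw v (by revert hc; cases kw.contains x <;> simp)]
    simp [List.foldl_append]

theorem pv_fold_sim (lines : List String) :
    ∀ (tf tr : String) (kw : PySem.Dict String (String ⊕ Bool)) (r : Int),
    kw.keys.Nodup → fa_flags kw = r → 0 ≤ r →
    lines.foldl lineStepB (tf, tr, r) =
      ((lines.foldl lineStepA (tf, tr, kw)).1,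
       (lines.foldl lineStepA (tf, tr, kw)).2.1,
       fa_flags (lines.foldl lineStepA (tf, tr, kw)).2.2) := by
  induction lines with
  | nil => intro tf tr kw r hnd hfa hr; simp [List.foldl_nil, hfa]
  | cons line lines IH =>
    intro tf tr kw r hnd hfa hr
    simp only [List.foldl_cons]
    by_cases hin : PySem.Str.isIn ":" line = true
    · cases hsp : PySem.Str.split? line ":" with
      | none => simp only [lineStepA, lineStepB, hin, if_true, hsp]; exact IH tf tr kw r hnd hfa hr
      | some l =>
        match l with
        | [] => simp only [lineStepA, lineStepB, hin, if_true, hsp]; exact IH tf tr kw r hnd hfa hr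
        | [x] => simp only [lineStepA, lineStepB, hin, if_true, hsp]; exact IH tf tr kw r hnd hfa hr
        | (x :: y :: z :: l') =>
          simp only [lineStepA, lineStepB, hin, if_true, hsp]
          exact IH tf tr kw r hnd hfa hr
        | [x, y] =>
          simp only [lineStepA, lineStepB, hin, if_true, hsp]
          by_cases hx1 : x = "t_find"
          · subst hx1
            simp only [reduceIte]
            have hget : FA_FLAGS.get? "t_find" = none := by decide
            have hfa' : fa_flags (kw.insert "t_find" (.inl y)) = r := by
              rw [pv_fa_insert kw hnd, hfa]; simp only [faStep, hget]
            exact IH y tr _ r (PySem.Dict.nodup_keys_insert _ _ _ hnd) hfa' hr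
          · by_cases hx2 : x = "t_replace"
            · subst hx2
              simp only [hx1, if_false, reduceIte]
              have hget : FA_FLAGS.get? "t_replace" = none := by decide
              have hfa' : fa_flags (kw.insert "t_replace" (.inl y)) = r := by
                rw [pv_fa_insert kw hnd, hfa]; simp only [faStep, hget]
              exact IH tf y _ r (PySem.Dict.nodup_keys_insert _ _ _ hnd) hfa' hr
            · simp only [hx1, hx2, if_false]
              cases hg : FA_FLAGS.get? x with
              | none =>
                have hcon : FA_FLAGS.contains x = false := by
                  rw [PySem.Dict.contains_eq_isSome_get?, hg]; rfl
                simp only [hcon, reduceIte]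
                exact IH tf tr kw r hnd hfa hr
              | some f =>
                have hcon : ¬ (FA_FLAGS.contains x = false) := by
                  rw [PySem.Dict.contains_eq_isSome_get?, hg]; simp
                simp only [hcon, if_false]
                by_cases hy : y ∈ truthy
                · simp only [hy, reduceIte, decide_true]
                  have hfa' : fa_flags (kw.insert x (.inr true)) = istep f true r := by
                    rw [pv_fa_insert kw hnd, hfa]; simp only [faStep, hg, pyTruth]
                  have hr' : 0 ≤ istep f true r := by
                    have := pv_faStep_nonneg hr (x, Sum.inr true)
                    simpa only [faStep, hg, pyTruth] using this
                  exact IH tf tr _ _ (PySem.Dict.nodup_keys_insert _ _ _ hnd) hfa' hr'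
                · simp only [hy, reduceIte, decide_false]
                  have hfa' : fa_flags (kw.insert x (.inr false)) = istep f false r := by
                    rw [pv_fa_insert kw hnd, hfa]; simp only [faStep, hg, pyTruth]
                  have hr' : 0 ≤ istep f false r := by
                    have := pv_faStep_nonneg hr (x, Sum.inr false)
                    simpa only [faStep, hg, pyTruth] using this
                  exact IH tf tr _ _ (PySem.Dict.nodup_keys_insert _ _ _ hnd) hfa' hr'
    · simp only [lineStepA, lineStepB, hin, if_false]
      exact IH tf tr kw r hnd hfa hr

-- ===== VERDICT (by name: the statement is the Claim_ definition above) =====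
theorem str_to_fa_spec : Claim_equal_str_to_fa := by
  intro s _ _
  unfold Spec_str_to_fa str_to_fa str_to_fa_alt
  exact (pv_fold_sim (PySem.Str.splitlines s) "" "" PySem.Dict.empty 24 (by decide) (by decide) (by decide)).symm
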